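-- pv_equiv track=rewrite | github.com/Gouda01/Dj5-Reviews-Training | 01 Python & sql/Codewars/06 Break camelCase.py | break_camel_case
-- ===== SOURCE A (Python) =====
-- def break_camel_case(s):
--     result = ""
--     for char in s:
--         if char.isupper():
--             result += " " + char
--         else:
--             result += char
--     return result.strip()  # Remove any leading/trailing spaces
-- ===== SOURCE B (Python) =====
-- def break_camel_case(s):
--     # Two staged passes: first collect the indices of the uppercase letters,
--     # then cut the string into slices at those indices and join with spaces.
--     cuts = [i for i, c in enumerate(s) if c.isupper()]
--     pieces = []
--     prev = 0
--     for i in cuts: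
--         pieces.append(s[prev:i])
--         prev = i
--     pieces.append(s[prev:])
--     return " ".join(pieces).strip()
-- ===== Notes on version B (the rewrite author's own statement) =====
-- stated objective: alternative
-- what changed: B works in two staged passes over indices: it first collects the uppercase positions via enumerate, then cuts the string into slices at those positions and joins the slices with spaces, instead of A's single pass that concatenates character by character with a space prefixed to each uppercase character.
import Mathlib
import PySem

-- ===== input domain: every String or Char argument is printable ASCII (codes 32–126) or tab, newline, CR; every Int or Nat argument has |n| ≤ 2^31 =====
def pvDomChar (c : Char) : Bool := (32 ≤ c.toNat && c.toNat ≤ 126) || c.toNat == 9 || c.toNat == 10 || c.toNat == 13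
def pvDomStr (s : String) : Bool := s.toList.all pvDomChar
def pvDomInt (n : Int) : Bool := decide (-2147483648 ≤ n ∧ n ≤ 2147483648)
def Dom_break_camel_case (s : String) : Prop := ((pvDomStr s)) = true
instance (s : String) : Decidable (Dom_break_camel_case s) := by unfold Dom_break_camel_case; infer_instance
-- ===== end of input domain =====

-- B cuts the string into slices at the uppercase indices (collected in a first pass) and
-- joins the slices with spaces, instead of A's per-character accumulation; same result.

-- ===== PORT A =====
-- result = ""; for char in s: result += (" " + char) if char.isupper() else char; return result.strip()
def break_camel_case (s : String) : String :=
  let result := s.toList.foldl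
    (fun acc c => if PySem.Chars.isupper c then acc ++ [' ', c] else acc ++ [c]) []
  String.mk (PySem.Chars.strip result)

-- ===== PORT B =====
-- cuts = [i for i, c in enumerate(s) if c.isupper()]
-- pieces = []; prev = 0; for i in cuts: pieces.append(s[prev:i]); prev = i
-- pieces.append(s[prev:]); return " ".join(pieces).strip()
def break_camel_case_alt (s : String) : String :=
  let cs := s.toList
  let cuts : List Int :=
    (PySem.List.enumerate cs 0).filterMap
      (fun p => if PySem.Chars.isupper p.2 then some p.1 else none)
  let st := cuts.foldl
    (fun (pp : List (List Char) × Int) i =>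
      (pp.1 ++ [PySem.Chars.slice cs (some pp.2) (some i)], i)) ([], 0)
  let pieces := st.1 ++ [PySem.Chars.slice cs (some st.2) none]
  String.mk (PySem.Chars.strip (PySem.Chars.join [' '] pieces))

-- ===== PRECONDITION & SPEC =====
def Spec_break_camel_case (s : String) (out : String) : Prop := out = break_camel_case_alt s
instance (s : String) (out : String) : Decidable (Spec_break_camel_case s out) := by unfold Spec_break_camel_case; infer_instance

-- ===== CLAIM (what is proved, stated in full; the proofs are below) =====
def Claim_equal_break_camel_case : Prop := ∀ (s : String), Dom_break_camel_case s → Spec_break_camel_case s (break_camel_case s)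

-- ===== LEMMAS AND PROOFS =====
def bccPiece (c : Char) : List Char := if PySem.Chars.isupper c then [' ', c] else [c]

-- A's loop is flatMap bccPiece
theorem bcc_foldl (cs : List Char) (r : List Char) :
    cs.foldl (fun acc c => if PySem.Chars.isupper c then acc ++ [' ', c] else acc ++ [c]) r
      = r ++ cs.flatMap bccPiece := by
  induction cs generalizing r with
  | nil => simp
  | cons c t ih =>
    simp only [List.foldl_cons, List.flatMap_cons, ih, bccPiece]
    split <;> simp

-- the uppercase indices of cs, starting at absolute position k
def bccCuts (cs : List Char) (k : Nat) : List Int :=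
  match cs with
  | [] => []
  | c :: t => if PySem.Chars.isupper c then (k : Int) :: bccCuts t (k+1) else bccCuts t (k+1)

theorem bcc_cuts_eq (cs : List Char) (k : Nat) :
    (PySem.List.enumerate cs (k : Int)).filterMap
        (fun p => if PySem.Chars.isupper p.2 then some p.1 else none)
      = bccCuts cs k := by
  induction cs generalizing k with
  | nil => rfl
  | cons c t ih =>
    rw [PySem.List.enumerate_cons]
    simp only [List.filterMap_cons, bccCuts]
    have h1 : ((k : Int) + 1) = ((k + 1 : Nat) : Int) := by push_cast; ring
    rw [h1, ih]
    by_cases h : PySem.Chars.isupper c = true <;> simp [h]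

-- the pieces produced by B's second loop, recursively
def bccPieces (cs : List Char) (is : List Int) (prev : Int) : List (List Char) :=
  match is with
  | [] => [PySem.Chars.slice cs (some prev) none]
  | i :: t => PySem.Chars.slice cs (some prev) (some i) :: bccPieces cs t i

theorem bcc_fold_pieces (cs : List Char) (is : List Int) (acc : List (List Char)) (prev : Int) :
    (is.foldl (fun (pp : List (List Char) × Int) i =>
        (pp.1 ++ [PySem.Chars.slice cs (some pp.2) (some i)], i)) (acc, prev)).1
      ++ [PySem.Chars.slice cs
            (some ((is.foldl (fun (pp : List (List Char) × Int) i =>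
              (pp.1 ++ [PySem.Chars.slice cs (some pp.2) (some i)], i)) (acc, prev)).2)) none]
      = acc ++ bccPieces cs is prev := by
  induction is generalizing acc prev with
  | nil => simp [bccPieces]
  | cons i t ih =>
    simp only [List.foldl_cons, bccPieces]
    rw [ih]; simp

-- main invariant: u is the already-committed part of the current piece, a the rest of cs
theorem bcc_K (cs : List Char) (a : List Char) : ∀ (u : List Char) (prev : Nat),
    cs.drop prev = u ++ a →
    PySem.Chars.join [' '] (bccPieces cs (bccCuts a (prev + u.length)) ((prev : Nat) : Int))
      = u ++ a.flatMap bccPiece := by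
  induction a with
  | nil =>
    intro u prev hdrop
    simp only [bccCuts, bccPieces, List.flatMap_nil, List.append_nil]
    rw [PySem.Chars.slice_eq_listSlice, PySem.List.slice_from_natCast,
      PySem.Chars.join_singleton, hdrop, List.append_nil]
  | cons c t ih =>
    intro u prev hdrop
    by_cases hc : PySem.Chars.isupper c = true
    · simp only [bccCuts, hc, if_pos, bccPieces]
      obtain ⟨w, ws, hw⟩ : ∃ w ws,
          bccPieces cs (bccCuts t (prev + u.length + 1)) ((prev + u.length : Nat) : Int) = w :: ws := by
        cases bccCuts t (prev + u.length + 1) with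
        | nil => exact ⟨_, _, rfl⟩
        | cons x xs => exact ⟨_, _, rfl⟩
      rw [hw, PySem.Chars.join_cons_cons, ← hw]
      have hslice : PySem.Chars.slice cs (some ((prev : Nat) : Int)) (some ((prev + u.length : Nat) : Int)) = u := by
        rw [PySem.Chars.slice_eq_listSlice, PySem.List.slice_natCast, hdrop]
        simp
      have hdrop' : cs.drop (prev + u.length) = [c] ++ t := by
        have h2 : cs.drop (prev + u.length) = (cs.drop prev).drop u.length := by
          rw [List.drop_drop]
        rw [h2, hdrop]; simp
      have ihc := ih [c] (prev + u.length) hdrop'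
      simp only [List.length_cons, List.length_nil, Nat.zero_add] at ihc
      rw [hslice, ihc]
      simp [List.flatMap_cons, bccPiece, hc]
    · have hc' : PySem.Chars.isupper c = false := by simpa using hc
      simp only [bccCuts, hc', Bool.false_eq_true, if_neg, not_false_iff]
      have hdrop' : cs.drop prev = (u ++ [c]) ++ t := by rw [hdrop]; simp
      have ihc := ih (u ++ [c]) prev hdrop'
      have hl : prev + u.length + 1 = prev + (u ++ [c]).length := by simp; omega
      rw [hl, ihc]
      simp [List.flatMap_cons, bccPiece, hc']

-- ===== VERDICT (by name: the statement is the Claim_ definition above) =====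
theorem break_camel_case_spec : Claim_equal_break_camel_case := by
  intro s _
  unfold Spec_break_camel_case break_camel_case break_camel_case_alt
  simp only
  rw [bcc_foldl]
  have h0 : (0 : Int) = ((0 : Nat) : Int) := rfl
  rw [h0, bcc_cuts_eq, bcc_fold_pieces]
  have hK := bcc_K s.toList s.toList [] 0 (by simp)
  simp only [List.length_nil, Nat.add_zero, List.nil_append] at hK
  simp only [List.nil_append]
  rw [hK]
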